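-- pv_equiv track=rewrite | github.com/Ehnonymoose/delver | server/mana.py | tokenizeManaString
-- ===== SOURCE A (Python) =====
-- IGNORE_CHARS = str.maketrans('', '', ''.join(c for c in map(chr, range(256)) if not c.isalnum() and c != ' '))
--
-- def tokenizeManaString(mana):
-- 	""" Takes in a string of mana symbols and tokenizes it.
-- 		Tokens are strings enclosed in {}s; the braces are
-- 		optional for one-character tokens.
--
-- 		Ignores all non-alphanumeric-or-space characters.
--
-- 		Example:
-- 			tokenizeManaString("{uw}b{2r}t")
-- 				-> ["uw", "b", "2r", "t"]
-- 	"""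
--
-- 	tokens = []
-- 	token_start = 0
--
-- 	while token_start < len(mana):
-- 		if mana[token_start] == '{':
-- 			rbrace = mana.find('}', token_start)
--
-- 			if rbrace == -1:
-- 				token = '{'
-- 				token_start += 1
-- 			else:
-- 				token = mana[token_start+1 : rbrace]
-- 				token_start = rbrace + 1
-- 		else:
-- 			token = mana[token_start]
-- 			token_start += 1
--
-- 		# clean up the token a bit and save it
-- 		token = token.lower().translate(IGNORE_CHARS)
--
-- 		# Do we want to check if this is a known token?
-- 		tokens.append( token )
--
-- 	return tokens
-- ===== SOURCE B (Python) =====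
-- def tokenizeManaString(mana):
-- 	""" One-pass state machine: scan each character once, buffering inside
-- 		braces, instead of A's index loop with repeated str.find scans. """
-- 	def clean(s):
-- 		return ''.join(c for c in s.lower() if c.isalnum() or c == ' ')
--
-- 	tokens = []
-- 	buf = None  # None = outside braces, else the chars seen since '{'
-- 	for ch in mana:
-- 		if buf is not None:
-- 			if ch == '}':
-- 				tokens.append(clean(buf))
-- 				buf = None
-- 			else:
-- 				buf += ch
-- 		elif ch == '{':
-- 			buf = ''
-- 		else:
-- 			tokens.append(clean(ch))
-- 	if buf is not None:
-- 		# no closing '}' ever comes: the '{' and every buffered char are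
-- 		# single-character tokens
-- 		tokens.append(clean('{'))
-- 		tokens.extend(clean(ch) for ch in buf)
-- 	return tokens
-- ===== Notes on version B (the rewrite author's own statement) =====
-- stated objective: alternative
-- what changed: Replaced the index-based while loop that calls str.find for each '{' token with a single left-to-right pass over the characters that buffers brace contents in a state machine, flushing an unmatched '{' and its buffered tail as single-character tokens.
import Mathlib
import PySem

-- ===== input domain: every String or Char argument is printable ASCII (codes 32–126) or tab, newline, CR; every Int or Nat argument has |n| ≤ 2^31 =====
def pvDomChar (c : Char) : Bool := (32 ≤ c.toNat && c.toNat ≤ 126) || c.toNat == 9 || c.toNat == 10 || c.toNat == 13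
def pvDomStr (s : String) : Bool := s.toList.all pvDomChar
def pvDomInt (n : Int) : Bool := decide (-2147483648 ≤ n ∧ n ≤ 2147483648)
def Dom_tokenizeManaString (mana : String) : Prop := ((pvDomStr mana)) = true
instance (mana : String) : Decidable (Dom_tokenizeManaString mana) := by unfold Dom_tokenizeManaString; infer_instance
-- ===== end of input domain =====

-- B replaces A's index loop with repeated str.find scans by a single-pass
-- buffering state machine; equivalence proved on all Dom strings.


-- ===== PORT A =====
-- token.lower().translate(IGNORE_CHARS): lowercase, then drop every
-- non-alphanumeric non-space character (exact on the ASCII domain: A's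
-- 256-entry translate table and Python's lower/isalnum agree with
-- PySem.Chars.lowerChar/isalnum there).
def cleanA (t : List Char) : String :=
  String.ofList ((t.map PySem.Chars.lowerChar).filter
    (fun c => PySem.Chars.isalnum c || c = ' '))

-- A's while loop over token_start, on the character list: mana[token_start]
-- is the head, mana.find('}', token_start) is the first '}' in the rest
-- (the head is '{' ≠ '}').
def tokA : List Char → List String
  | [] => []
  | c :: rest =>
    if c = '{' then
      match rest.findIdx? (· = '}') with
      | none => cleanA ['{'] :: tokA rest
      | some j => cleanA (rest.take j) :: tokA (rest.drop (j + 1))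
    else
      cleanA [c] :: tokA rest
termination_by l => l.length
decreasing_by all_goals (simp only [List.length_drop, List.length_cons]; omega)

def tokenizeManaString (mana : String) : List String := tokA mana.toList

-- ===== PORT B =====
-- ''.join(c for c in s.lower() if c.isalnum() or c == ' ')
def cleanB (s : List Char) : String :=
  String.ofList (s.filterMap (fun c =>
    let l := PySem.Chars.lowerChar c
    if PySem.Chars.isalnum l || l = ' ' then some l else none))

-- one loop iteration of B: state = (tokens so far, optional brace buffer)
def stepB (st : List String × Option (List Char)) (ch : Char) :
    List String × Option (List Char) :=
  match st with
  | (toks, some buf) =>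
    if ch = '}' then (toks ++ [cleanB buf], none)
    else (toks, some (buf ++ [ch]))
  | (toks, none) =>
    if ch = '{' then (toks, some [])
    else (toks ++ [cleanB [ch]], none)

-- the final flush of an unmatched '{' and its buffered characters
def finishB (st : List String × Option (List Char)) : List String :=
  match st with
  | (toks, none) => toks
  | (toks, some buf) => toks ++ [cleanB ['{']] ++ buf.map (fun ch => cleanB [ch])

def tokenizeManaString_alt (mana : String) : List String :=
  finishB (mana.toList.foldl stepB ([], none))

-- ===== PRECONDITION & SPEC =====
def Spec_tokenizeManaString (mana : String) (out : List String) : Prop := out = tokenizeManaString_alt mana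
instance (mana : String) (out : List String) : Decidable (Spec_tokenizeManaString mana out) := by unfold Spec_tokenizeManaString; infer_instance

-- ===== CLAIM (what is proved, stated in full; the proofs are below) =====
def Claim_equal_tokenizeManaString : Prop := ∀ (mana : String), Dom_tokenizeManaString mana → Spec_tokenizeManaString mana (tokenizeManaString mana)

-- ===== LEMMAS AND PROOFS =====

theorem cleanA_eq_cleanB (t : List Char) : cleanA t = cleanB t := by
  unfold cleanA cleanB
  congr 1
  induction t with
  | nil => rfl
  | cons c r ih => simp only [List.map_cons, List.filter_cons, List.filterMap_cons]; split <;> simp_all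

-- the fold from an open-brace state, characterized by the first '}' in the input
theorem foldl_some (l : List Char) : ∀ (toks : List String) (buf : List Char),
    finishB (l.foldl stepB (toks, some buf)) =
      match l.findIdx? (· = '}') with
      | some j => finishB ((l.drop (j + 1)).foldl stepB (toks ++ [cleanB (buf ++ l.take j)], none))
      | none => toks ++ [cleanB ['{']] ++ (buf ++ l).map (fun ch => cleanB [ch]) := by
  induction l with
  | nil => intro toks buf; simp [finishB]
  | cons d rest ih =>
    intro toks buf
    by_cases hd : d = '}'
    · subst hd
      simp [List.findIdx?_cons, stepB]
    · rw [List.findIdx?_cons]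
      simp only [hd, decide_eq_true_eq]
      have : stepB (toks, some buf) d = (toks, some (buf ++ [d])) := by
        simp [stepB, hd]
      rw [List.foldl_cons, this, ih]
      cases hfi : rest.findIdx? (· = '}') with
      | none => simp
      | some j => simp

theorem findIdx?_none_no_rbrace {l : List Char} (h : l.findIdx? (· = '}') = none) :
    ∀ c ∈ l, c ≠ '}' := by
  intro c hc
  have := List.findIdx?_eq_none_iff.mp h c hc
  simpa using this

-- on a '}'-free suffix, A emits each character as its own (cleaned) token
theorem tokA_no_rbrace (l : List Char) (h : ∀ c ∈ l, c ≠ '}') :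
    tokA l = l.map (fun ch => cleanA [ch]) := by
  induction l with
  | nil => simp [tokA]
  | cons c rest ih =>
    have hrest : ∀ x ∈ rest, x ≠ '}' := fun x hx => h x (List.mem_cons_of_mem _ hx)
    rw [tokA]
    by_cases hc : c = '{'
    · have hnone : rest.findIdx? (· = '}') = none := by
        rw [List.findIdx?_eq_none_iff]
        intro x hx; simpa using hrest x hx
      simp [hc, hnone, ih hrest]
    · simp [hc, ih hrest]

theorem tokB_eq_tokA : ∀ (n : ℕ) (l : List Char), l.length ≤ n → ∀ (toks : List String),
    finishB (l.foldl stepB (toks, none)) = toks ++ tokA l := by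
  intro n
  induction n with
  | zero => intro l hl toks; interval_cases hll : l.length; simp_all [finishB, List.length_eq_zero_iff.mp hll, tokA]
  | succ n ih =>
    intro l hl toks
    cases l with
    | nil => simp [finishB, tokA]
    | cons c rest =>
      simp only [List.length_cons, Nat.succ_le_succ_iff] at hl
      by_cases hc : c = '{'
      · subst hc
        have hstep : stepB (toks, none) '{' = (toks, some []) := by simp [stepB]
        rw [List.foldl_cons, hstep, foldl_some]
        cases hfi : rest.findIdx? (· = '}') with
        | none =>
          have hmap := tokA_no_rbrace rest (findIdx?_none_no_rbrace hfi)
          simp [tokA, hfi, hmap, cleanA_eq_cleanB, List.append_assoc]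
        | some j =>
          have hlen : (rest.drop (j + 1)).length ≤ n := by
            rw [List.length_drop]; omega
          simp [tokA, hfi, ih _ hlen, cleanA_eq_cleanB, List.append_assoc]
      · have hstep : stepB (toks, none) c = (toks ++ [cleanB [c]], none) := by
          simp [stepB, hc]
        rw [List.foldl_cons, hstep, ih _ hl, tokA]
        simp [hc, cleanA_eq_cleanB, List.append_assoc]

-- ===== VERDICT (by name: the statement is the Claim_ definition above) =====
theorem tokenizeManaString_spec : Claim_equal_tokenizeManaString := by
  intro mana _
  show tokenizeManaString mana = tokenizeManaString_alt mana
  unfold tokenizeManaString tokenizeManaString_alt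
  exact (tokB_eq_tokA mana.toList.length mana.toList le_rfl []).symm
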